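-- pv_equiv track=rewrite | github.com/Samuel-BlankAmber/ECSC2024-CTF-Jeopardy | hardware01/src/cpu_tester/main.py | find_greatest_common_indexes
-- ===== SOURCE A (Python) =====
-- def find_greatest_common_indexes(cylinders):
--     common_numbers = set(cylinders[0])
--     for sublist in cylinders[1:]:
--         common_numbers.intersection_update(sublist)
--     if not common_numbers:
--         return None, []
--     greatest_common_number = max(common_numbers)
--     indexes = []
--     for sublist in cylinders:
--         if greatest_common_number in sublist:
--             indexes.append(sublist.index(greatest_common_number))
--         else:
--             indexes.append(None)
--     return greatest_common_number, indexes
-- ===== SOURCE B (Python) =====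
-- def find_greatest_common_indexes(cylinders):
--     counts = {}
--     for sublist in cylinders:
--         for v in dict.fromkeys(sublist):
--             counts[v] = counts.get(v, 0) + 1
--     n = len(cylinders)
--     common = [v for v, c in counts.items() if c == n]
--     if not common:
--         return None, []
--     value = max(common)
--     return value, [sublist.index(value) for sublist in cylinders]
-- ===== Notes on version B (the rewrite author's own statement) =====
-- stated objective: alternative
-- what changed: Replaces the sequential set-intersection pass with a frequency table: each value is counted once per sublist, common values are those whose count equals len(cylinders), then max and a per-sublist index pass.
-- outside the precondition, e.g. on find_greatest_common_indexes([]): A raises IndexError, B returns (None, [])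
-- crash fix: On empty cylinders A raises IndexError (it indexes cylinders[0]); B's frequency table is empty there, so B naturally returns (None, []). — e.g. on find_greatest_common_indexes([]): A raises IndexError, B returns (none, [])
import Mathlib
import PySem

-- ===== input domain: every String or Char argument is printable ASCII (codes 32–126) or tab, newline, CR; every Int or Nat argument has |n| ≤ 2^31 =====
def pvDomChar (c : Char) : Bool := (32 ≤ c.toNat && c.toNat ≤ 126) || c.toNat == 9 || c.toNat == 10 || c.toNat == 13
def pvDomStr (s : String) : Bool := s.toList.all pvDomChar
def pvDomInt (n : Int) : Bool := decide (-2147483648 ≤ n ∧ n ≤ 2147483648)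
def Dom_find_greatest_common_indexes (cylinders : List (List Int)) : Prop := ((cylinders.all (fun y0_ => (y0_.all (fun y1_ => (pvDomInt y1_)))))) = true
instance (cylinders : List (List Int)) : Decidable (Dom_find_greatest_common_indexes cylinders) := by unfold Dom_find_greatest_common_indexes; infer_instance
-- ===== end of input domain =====

-- B builds a per-value frequency table instead of A's sequential set intersection; same cost, different algorithm.

-- ===== PORT A =====
def find_greatest_common_indexes (cylinders : List (List Int)) : Option Int × List (Option Int) :=
  match PySem.List.pyGet? cylinders 0 with
  | none => (none, [])   -- Python raises IndexError here (cylinders[0]); excluded by Pre_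
  | some first =>
    let common_numbers :=
      (PySem.List.slice cylinders (some 1) none).foldl
        (fun s sublist => PySem.Set.inter s (PySem.Set.ofList sublist))
        (PySem.Set.ofList first)
    if common_numbers = [] then (none, [])
    else
      match PySem.List.max? common_numbers (fun x => x) with
      | none => (none, [])   -- unreachable: common_numbers ≠ []
      | some greatest =>
        let indexes := cylinders.foldl
          (fun acc sublist =>
            acc ++ [if sublist.contains greatest
                    then (PySem.List.index? sublist greatest).map Int.ofNat
                    else none])
          ([] : List (Option Int))
        (some greatest, indexes)

-- ===== PORT B =====
def find_greatest_common_indexes_alt (cylinders : List (List Int)) : Option Int × List (Option Int) :=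
  let counts : PySem.Dict Int Int :=
    cylinders.foldl
      (fun d sublist => (PySem.List.dedup sublist).foldl (fun d x => d.modify x 0 fun x => x + 1) d)
      PySem.Dict.empty
  let n : Int := cylinders.length
  let common := (counts.items.filter (fun p => p.2 == n)).map Prod.fst
  if common = [] then (none, [])
  else
    match PySem.List.max? common (fun x => x) with
    | none => (none, [])   -- unreachable: common ≠ []
    | some value =>
      (some value, cylinders.map (fun sublist => (PySem.List.index? sublist value).map Int.ofNat))

-- ===== PRECONDITION & SPEC =====
-- Pre_ excludes exactly the empty list, on which Python A raises IndexError at cylinders[0].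
def Pre_find_greatest_common_indexes (cylinders : List (List Int)) : Prop := cylinders ≠ []
instance (cylinders : List (List Int)) : Decidable (Pre_find_greatest_common_indexes cylinders) := by unfold Pre_find_greatest_common_indexes; infer_instance
def pvWitness_find_greatest_common_indexes : List (List Int) := [[1, 2], [2, 3]]

-- On empty cylinders A raises IndexError (it indexes cylinders[0]); B's frequency table is empty there, so B returns (None, []).
def Raises_find_greatest_common_indexes (cylinders : List (List Int)) : Prop := cylinders = []
instance (cylinders : List (List Int)) : Decidable (Raises_find_greatest_common_indexes cylinders) := by unfold Raises_find_greatest_common_indexes; infer_instance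
def pvRaiseWitness_find_greatest_common_indexes : List (List Int) := []
def pvRaiseWitnessOut_find_greatest_common_indexes : Option Int × List (Option Int) := (none, [])

def Spec_find_greatest_common_indexes (cylinders : List (List Int)) (out : Option Int × List (Option Int)) : Prop := out = find_greatest_common_indexes_alt cylinders
instance (cylinders : List (List Int)) (out : Option Int × List (Option Int)) : Decidable (Spec_find_greatest_common_indexes cylinders out) := by unfold Spec_find_greatest_common_indexes; infer_instance

-- ===== CLAIM (what is proved, stated in full; the proofs are below) =====
def Claim_equal_find_greatest_common_indexes : Prop := ∀ (cylinders : List (List Int)), Dom_find_greatest_common_indexes cylinders → Pre_find_greatest_common_indexes cylinders → Spec_find_greatest_common_indexes cylinders (find_greatest_common_indexes cylinders)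
def Claim_raises_find_greatest_common_indexes : Prop := (∀ (cylinders : List (List Int)), Dom_find_greatest_common_indexes cylinders → Raises_find_greatest_common_indexes cylinders → ¬ Pre_find_greatest_common_indexes cylinders) ∧ (Dom_find_greatest_common_indexes (pvRaiseWitness_find_greatest_common_indexes) ∧ Raises_find_greatest_common_indexes (pvRaiseWitness_find_greatest_common_indexes) ∧ find_greatest_common_indexes_alt (pvRaiseWitness_find_greatest_common_indexes) = pvRaiseWitnessOut_find_greatest_common_indexes)

-- ===== LEMMAS AND PROOFS =====

-- membership in A's intersection fold
theorem mem_foldl_inter (subs : List (List Int)) (s : PySem.Set Int) (x : Int) :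
    x ∈ subs.foldl (fun s sublist => PySem.Set.inter s (PySem.Set.ofList sublist)) s ↔
      x ∈ s ∧ ∀ sub ∈ subs, x ∈ sub := by
  induction subs generalizing s with
  | nil => simp
  | cons hd t ih =>
    simp only [List.foldl_cons, ih, PySem.Set.mem_inter, PySem.Set.mem_ofList, List.mem_cons]
    constructor
    · rintro ⟨⟨hs, hh⟩, ht⟩
      exact ⟨hs, fun sub hsub => hsub.elim (fun e => e ▸ hh) (ht sub)⟩
    · rintro ⟨hs, hall⟩
      exact ⟨⟨hs, hall hd (Or.inl rfl)⟩, fun sub hsub => hall sub (Or.inr hsub)⟩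

-- count in the flattened dedup'd list = number of sublists containing v
theorem count_flatMap_dedup (cylinders : List (List Int)) (v : Int) :
    (cylinders.flatMap PySem.List.dedup).count v = cylinders.countP (fun sub => decide (v ∈ sub)) := by
  induction cylinders with
  | nil => rfl
  | cons hd t ih =>
    simp only [List.flatMap_cons, List.count_append, ih, List.countP_cons]
    by_cases hv : v ∈ hd
    · rw [List.count_eq_one_of_mem (PySem.List.nodup_dedup hd) ((PySem.List.mem_dedup hd v).mpr hv)]
      simp [hv, Nat.add_comm]
    · rw [List.count_eq_zero.mpr (fun hc => hv ((PySem.List.mem_dedup hd v).mp hc))]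
      simp [hv]

-- max? with identity key depends only on membership
theorem max?_id_congr (xs ys : List Int) (h : ∀ a, a ∈ xs ↔ a ∈ ys) :
    PySem.List.max? xs (fun x => x) = PySem.List.max? ys (fun x => x) := by
  cases hx : PySem.List.max? xs (fun x => x) with
  | none =>
    have hxe := (PySem.List.max?_eq_none_iff xs (fun x => x)).mp hx
    subst hxe
    have : ys = [] :=
      List.eq_nil_iff_forall_not_mem.mpr (fun a ha => by simp [← h a] at ha)
    rw [this]; rfl
  | some m =>
    cases hy : PySem.List.max? ys (fun x => x) with
    | none =>
      have hye := (PySem.List.max?_eq_none_iff ys (fun x => x)).mp hy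
      subst hye
      exact absurd ((h m).mp (PySem.List.max?_mem hx)) (by simp)
    | some m' =>
      have h1 : m ≤ m' := PySem.List.max?_isMax hy m ((h m).mp (PySem.List.max?_mem hx))
      have h2 : m' ≤ m := PySem.List.max?_isMax hx m' ((h m').mpr (PySem.List.max?_mem hy))
      exact congrArg some (le_antisymm h1 h2)

-- membership in B's common list
theorem mem_common_alt (L : List Int) (n : Int) (v : Int) :
    v ∈ (((PySem.Dict.counter L).items.filter (fun p => p.2 == n)).map Prod.fst) ↔
      v ∈ L ∧ (L.count v : Int) = n := by
  rw [PySem.Dict.items_counter, List.filter_map]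
  simp [Function.comp, PySem.Set.mem_ofList]

-- the two "common values" lists have the same members (cylinders nonempty)
theorem common_members (first : List Int) (rest : List (List Int)) (v : Int) :
    v ∈ ((rest).foldl (fun s sublist => PySem.Set.inter s (PySem.Set.ofList sublist))
          (PySem.Set.ofList first)) ↔
      v ∈ ((((PySem.Dict.counter ((first :: rest).flatMap PySem.List.dedup)).items.filter
            (fun p => p.2 == ((first :: rest).length : Int))).map Prod.fst)) := by
  rw [mem_foldl_inter, mem_common_alt, count_flatMap_dedup, PySem.Set.mem_ofList, Nat.cast_inj]
  constructor
  · rintro ⟨hf, hall⟩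
    have hallc : ∀ sub ∈ (first :: rest), v ∈ sub := by
      intro sub hsub
      rcases List.mem_cons.mp hsub with rfl | hmem
      · exact hf
      · exact hall sub hmem
    refine ⟨List.mem_flatMap.mpr ⟨first, List.mem_cons_self .., (PySem.List.mem_dedup _ _).mpr hf⟩, ?_⟩
    rw [List.countP_eq_length]
    intro sub hsub; simpa using hallc sub hsub
  · rintro ⟨-, hcnt⟩
    have hall : ∀ sub ∈ (first :: rest), v ∈ sub := by
      intro sub hsub
      simpa using List.countP_eq_length.mp hcnt sub hsub
    exact ⟨hall first (List.mem_cons_self ..), fun sub hsub => hall sub (List.mem_cons.mpr (Or.inr hsub))⟩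

-- ===== VERDICT (by name: the statement is the Claim_ definition above) =====
theorem find_greatest_common_indexes_spec : Claim_equal_find_greatest_common_indexes := by
  intro cylinders _ hpre
  obtain ⟨first, rest, rfl⟩ := List.exists_cons_of_ne_nil hpre
  have hget : PySem.List.pyGet? (first :: rest) 0 = some first := by
    simp [PySem.List.pyGet?, PySem.List.pyIdx?]
  have hslice : PySem.List.slice (first :: rest) (some 1) none = rest := by
    rw [PySem.List.slice_from _ (by norm_num)]; rfl
  have hfold : (first :: rest).foldl
      (fun d sublist => (PySem.List.dedup sublist).foldl (fun d x => d.modify x 0 fun x => x + 1) d)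
      PySem.Dict.empty
      = PySem.Dict.counter ((first :: rest).flatMap PySem.List.dedup) := by
    rw [PySem.Dict.counter_eq_foldl, List.foldl_flatMap]
  unfold Spec_find_greatest_common_indexes find_greatest_common_indexes find_greatest_common_indexes_alt
  simp only [hget, hslice, hfold]
  set cA := (rest).foldl (fun s sublist => PySem.Set.inter s (PySem.Set.ofList sublist))
      (PySem.Set.ofList first) with hcA
  set cB := (((PySem.Dict.counter ((first :: rest).flatMap PySem.List.dedup)).items.filter
      (fun p => p.2 == ((first :: rest).length : Int))).map Prod.fst) with hcB
  have hmem : ∀ v, v ∈ cA ↔ v ∈ cB := fun v => common_members first rest v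
  have hmax : PySem.List.max? cA (fun x => x) = PySem.List.max? cB (fun x => x) :=
    max?_id_congr cA cB hmem
  have hnil : (cA = []) ↔ (cB = []) := by
    constructor <;> intro hn <;> apply List.eq_nil_iff_forall_not_mem.mpr <;> intro a ha
    · exact List.eq_nil_iff_forall_not_mem.mp hn a ((hmem a).mpr ha)
    · exact List.eq_nil_iff_forall_not_mem.mp hn a ((hmem a).mp ha)
  by_cases hA : cA = []
  · rw [if_pos hA, if_pos (hnil.mp hA)]
  · rw [if_neg hA, if_neg (fun hn => hA (hnil.mpr hn)), ← hmax]
    cases hm : PySem.List.max? cA (fun x => x) with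
    | none => rfl
    | some g =>
      simp only [Prod.mk.injEq, true_and]
      have hshape := PySem.List.foldl_append_singleton_eq_map
        (fun sublist => if sublist.contains g
              then (PySem.List.index? sublist g).map Int.ofNat else none)
        (first :: rest) ([] : List (Option Int))
      simp only [List.nil_append] at hshape
      rw [hshape]
      apply List.map_congr_left
      intro sub _
      by_cases hg : sub.contains g
      · rw [if_pos hg]
      · rw [if_neg hg]
        rw [(PySem.List.index?_eq_none_iff sub g).mpr (by simpa using hg)]
        rfl

@[simp] theorem find_greatest_common_indexes_raises : Claim_raises_find_greatest_common_indexes := by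
  unfold Claim_raises_find_greatest_common_indexes
  exact ⟨fun c _ hr hp => hp hr, by decide⟩
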